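-- pv_equiv track=rewrite | github.com/AlexanderJCS/advent-of-code-2024 | day-15/part_1.py | run_instruction
-- ===== SOURCE A (Python) =====
-- def run_instruction(
--         robot_pos: tuple[int, int],
--         crates: set[tuple[int, int]],
--         walls: set[tuple[int, int]],
--         instruction: tuple[int, int]
-- ) -> tuple:
--     """
--     Runs the instruction.
--     :return: new robot pos, crates
--     """
--
--     new_robot_pos = (robot_pos[0] + instruction[0], robot_pos[1] + instruction[1])
--
--     if new_robot_pos in walls:
--         return robot_pos, crates
--
--     if new_robot_pos in crates:
--         # move the crate in the direction until you hit a wall (impossible, revert to original position) or until there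
--         # is a free space
--         offset = 1
--         valid_space = False
--         while True:
--             new_crate_pos = (new_robot_pos[0] + instruction[0] * offset, new_robot_pos[1] + instruction[1] * offset)
--
--             if new_crate_pos in crates:
--                 offset += 1
--                 continue
--
--             if new_crate_pos in walls:
--                 break
--
--             valid_space = True
--             break
--
--         if not valid_space:
--             return robot_pos, crates
--
--         crates = set(crates)
--         crates.remove(new_robot_pos)
--         crates.add(new_crate_pos)
--
--     return new_robot_pos, crates
-- ===== SOURCE B (Python) =====
-- def _ray_offset(c, p, step):
--     """Offset k >= 0 with c == p + k*step, if any (step nonzero)."""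
--     sx, sy = step
--     if sx != 0:
--         d = c[0] - p[0]
--         if d % sx != 0:
--             return None
--         k = d // sx
--     elif sy != 0:
--         d = c[1] - p[1]
--         if d % sy != 0:
--             return None
--         k = d // sy
--     else:
--         return None
--     if k >= 0 and c[0] == p[0] + k * sx and c[1] == p[1] + k * sy:
--         return k
--     return None
--
--
-- def run_instruction(
--         robot_pos: tuple[int, int],
--         crates: set[tuple[int, int]],
--         walls: set[tuple[int, int]],
--         instruction: tuple[int, int]
-- ) -> tuple:
--     new_robot_pos = (robot_pos[0] + instruction[0], robot_pos[1] + instruction[1])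
--
--     if new_robot_pos in walls:
--         return robot_pos, crates
--
--     if new_robot_pos not in crates:
--         return new_robot_pos, crates
--
--     # One pass over the crate set: project every crate onto the push ray as an
--     # integer offset, then take the least offset NOT occupied (mex of the
--     # sorted offsets).  That is where the pushed crate line ends.
--     offs = sorted(k for c in crates
--                   if (k := _ray_offset(c, new_robot_pos, instruction)) is not None)
--     m = 0
--     for k in offs:
--         if k == m:
--             m += 1
--     end = (new_robot_pos[0] + instruction[0] * m, new_robot_pos[1] + instruction[1] * m)
--
--     if end in walls:
--         return robot_pos, crates
--
--     crates = set(crates)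
--     crates.remove(new_robot_pos)
--     crates.add(end)
--     return new_robot_pos, crates
-- ===== Notes on version B (the rewrite author's own statement) =====
-- stated objective: alternative
-- what changed: A probes cell after cell along the push direction with repeated set-membership tests until it finds a free cell or a wall; B instead makes one pass over the crate set projecting every crate onto the push ray as an integer offset, sorts the offsets and takes their mex (first gap) to locate the end of the pushed line directly.
import Mathlib
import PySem

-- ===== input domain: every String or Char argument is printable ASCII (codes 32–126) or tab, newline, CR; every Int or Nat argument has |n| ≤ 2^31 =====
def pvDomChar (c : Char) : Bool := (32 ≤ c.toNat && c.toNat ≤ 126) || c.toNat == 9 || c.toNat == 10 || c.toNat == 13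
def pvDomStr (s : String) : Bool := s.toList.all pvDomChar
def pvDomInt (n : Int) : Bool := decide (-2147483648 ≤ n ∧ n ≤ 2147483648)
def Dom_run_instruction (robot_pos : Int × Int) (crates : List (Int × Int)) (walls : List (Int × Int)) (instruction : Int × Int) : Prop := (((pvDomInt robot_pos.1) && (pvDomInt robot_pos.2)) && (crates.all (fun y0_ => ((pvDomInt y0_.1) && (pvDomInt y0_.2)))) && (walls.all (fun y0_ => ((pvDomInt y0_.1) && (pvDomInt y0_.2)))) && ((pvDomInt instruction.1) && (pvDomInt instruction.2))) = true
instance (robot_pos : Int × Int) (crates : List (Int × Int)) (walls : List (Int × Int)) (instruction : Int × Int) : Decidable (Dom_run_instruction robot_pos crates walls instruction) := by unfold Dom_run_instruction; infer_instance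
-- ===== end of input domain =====

-- B replaces A's repeated membership probes along the push direction by ONE pass over the
-- crate set (projecting each crate to its integer offset on the push ray) followed by a
-- sort and a mex scan that finds the first free cell; objective: alternative algorithm.

-- ===== PORT A =====
-- A's `while True` scan: probes p + offset*step for offset = 1, 2, …; continues while the
-- probed cell is a crate, stops with valid=false on a wall, valid=true on a free cell.
-- Fuel `crates.length + 1` is a totality guard only: for step ≠ (0,0) the probed cells are
-- pairwise distinct, so at most crates.length probes can hit a crate (fuel 0 is unreachable
-- under Pre_run_instruction, which excludes exactly the inputs where Python's loop spins forever).
def pvLoopA (crates walls : List (Int × Int)) (p step : Int × Int) (offset : Int) : Nat → (Int × Int) × Bool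
  | 0 => (p, false)
  | fuel + 1 =>
    let new_crate_pos := (p.1 + step.1 * offset, p.2 + step.2 * offset)
    if new_crate_pos ∈ crates then pvLoopA crates walls p step (offset + 1) fuel
    else if new_crate_pos ∈ walls then (new_crate_pos, false)
    else (new_crate_pos, true)

def run_instruction (robot_pos : Int × Int) (crates : List (Int × Int)) (walls : List (Int × Int)) (instruction : Int × Int) : (Int × Int) × (List (Int × Int)) :=
  let new_robot_pos := (robot_pos.1 + instruction.1, robot_pos.2 + instruction.2)
  if new_robot_pos ∈ walls then (robot_pos, crates)
  else if new_robot_pos ∈ crates then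
    let r := pvLoopA crates walls new_robot_pos instruction 1 (crates.length + 1)
    if !r.2 then (robot_pos, crates)
    else
      -- crates.remove(new_robot_pos); crates.add(new_crate_pos); remove? cannot be none
      -- here (new_robot_pos ∈ crates was just checked), so getD's default is unreachable
      (new_robot_pos, PySem.Set.add ((PySem.Set.remove? crates new_robot_pos).getD crates) r.1)
  else (new_robot_pos, crates)

-- ===== PORT B =====
-- offset k ≥ 0 with c = p + k*step, if any (none for step = (0,0))
def pvRayOffset (c p step : Int × Int) : Option Int :=
  if step.1 ≠ 0 then
    let d := c.1 - p.1
    if PySem.Int.mod d step.1 ≠ 0 then none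
    else
      let k := PySem.Int.floordiv d step.1
      if 0 ≤ k ∧ c.1 = p.1 + k * step.1 ∧ c.2 = p.2 + k * step.2 then some k else none
  else if step.2 ≠ 0 then
    let d := c.2 - p.2
    if PySem.Int.mod d step.2 ≠ 0 then none
    else
      let k := PySem.Int.floordiv d step.2
      if 0 ≤ k ∧ c.1 = p.1 + k * step.1 ∧ c.2 = p.2 + k * step.2 then some k else none
  else none

def run_instruction_alt (robot_pos : Int × Int) (crates : List (Int × Int)) (walls : List (Int × Int)) (instruction : Int × Int) : (Int × Int) × (List (Int × Int)) :=
  let new_robot_pos := (robot_pos.1 + instruction.1, robot_pos.2 + instruction.2)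
  if new_robot_pos ∈ walls then (robot_pos, crates)
  else if new_robot_pos ∉ crates then (new_robot_pos, crates)
  else
    let offs := PySem.List.sorted (crates.filterMap (fun c => pvRayOffset c new_robot_pos instruction)) (fun x => x) false
    let m := offs.foldl (fun m k => if k = m then m + 1 else m) 0
    let e := (new_robot_pos.1 + instruction.1 * m, new_robot_pos.2 + instruction.2 * m)
    if e ∈ walls then (robot_pos, crates)
    else (new_robot_pos, PySem.Set.add ((PySem.Set.remove? crates new_robot_pos).getD crates) e)

-- ===== PRECONDITION & SPEC =====
-- Pre_ excludes exactly the inputs where Python A never returns: with instruction (0,0) and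
-- the robot standing on a crate and not on a wall, A's while-loop re-probes the same cell forever.
def Pre_run_instruction (robot_pos : Int × Int) (crates : List (Int × Int)) (walls : List (Int × Int)) (instruction : Int × Int) : Prop :=
  instruction ≠ (0, 0) ∨ robot_pos ∉ crates ∨ robot_pos ∈ walls
instance (robot_pos : Int × Int) (crates : List (Int × Int)) (walls : List (Int × Int)) (instruction : Int × Int) : Decidable (Pre_run_instruction robot_pos crates walls instruction) := by unfold Pre_run_instruction; infer_instance

def pvWitness_run_instruction : (Int × Int) × (List (Int × Int)) × (List (Int × Int)) × (Int × Int) :=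
  ((0, 0), [(0, 1), (0, 2)], [(0, 4)], (0, 1))

def Spec_run_instruction (robot_pos : Int × Int) (crates : List (Int × Int)) (walls : List (Int × Int)) (instruction : Int × Int) (out : (Int × Int) × (List (Int × Int))) : Prop := out = run_instruction_alt robot_pos crates walls instruction
instance (robot_pos : Int × Int) (crates : List (Int × Int)) (walls : List (Int × Int)) (instruction : Int × Int) (out : (Int × Int) × (List (Int × Int))) : Decidable (Spec_run_instruction robot_pos crates walls instruction out) := by unfold Spec_run_instruction; infer_instance

-- ===== CLAIM (what is proved, stated in full; the proofs are below) =====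
def Claim_equal_run_instruction : Prop := ∀ (robot_pos : Int × Int) (crates : List (Int × Int)) (walls : List (Int × Int)) (instruction : Int × Int), Dom_run_instruction robot_pos crates walls instruction → Pre_run_instruction robot_pos crates walls instruction → Spec_run_instruction robot_pos crates walls instruction (run_instruction robot_pos crates walls instruction)

-- ===== LEMMAS AND PROOFS =====

-- the cell at offset k on the push ray
def pvPos (p step : Int × Int) (k : Int) : Int × Int := (p.1 + step.1 * k, p.2 + step.2 * k)

lemma pvRayOffset_sound {c p step : Int × Int} {k : Int}
    (h : pvRayOffset c p step = some k) : 0 ≤ k ∧ c = pvPos p step k := by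
  simp only [pvRayOffset] at h
  split_ifs at h with h1 h2 h3 h4 h5 h6 <;> simp only [Option.some.injEq] at h
  · obtain ⟨ha, hb, hc2⟩ := h3
    rw [h] at ha hb hc2
    refine ⟨ha, ?_⟩
    simp only [pvPos]
    exact Prod.ext (by rw [hb]; ring) (by rw [hc2]; ring)
  · obtain ⟨ha, hb, hc2⟩ := h6
    rw [h] at ha hb hc2
    refine ⟨ha, ?_⟩
    simp only [pvPos]
    exact Prod.ext (by rw [hb]; ring) (by rw [hc2]; ring)

lemma pvRayOffset_complete {p step : Int × Int} (hstep : step ≠ (0, 0)) {k : Int}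
    (hk : 0 ≤ k) : pvRayOffset (pvPos p step k) p step = some k := by
  have hc1 : (pvPos p step k).1 = p.1 + step.1 * k := rfl
  have hc2 : (pvPos p step k).2 = p.2 + step.2 * k := rfl
  simp only [pvRayOffset, hc1, hc2]
  have e1 : p.1 + step.1 * k - p.1 = k * step.1 := by ring
  have e2 : p.2 + step.2 * k - p.2 = k * step.2 := by ring
  by_cases h1 : step.1 ≠ 0
  · have hmod : PySem.Int.mod (p.1 + step.1 * k - p.1) step.1 = 0 := by
      rw [e1, PySem.Int.mod_eq_zero_iff_dvd]; exact dvd_mul_left _ _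
    have hdiv : PySem.Int.floordiv (p.1 + step.1 * k - p.1) step.1 = k := by
      rw [e1]; simp [PySem.Int.floordiv, Int.mul_fdiv_cancel _ h1]
    rw [if_pos h1, if_neg (by rw [hmod]; exact fun hcon => hcon rfl), hdiv,
      if_pos ⟨hk, by ring, by ring⟩]
  · have h2 : step.2 ≠ 0 := by
      intro h2; exact hstep (Prod.ext (not_not.mp h1) h2)
    have hmod : PySem.Int.mod (p.2 + step.2 * k - p.2) step.2 = 0 := by
      rw [e2, PySem.Int.mod_eq_zero_iff_dvd]; exact dvd_mul_left _ _
    have hdiv : PySem.Int.floordiv (p.2 + step.2 * k - p.2) step.2 = k := by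
      rw [e2]; simp [PySem.Int.floordiv, Int.mul_fdiv_cancel _ h2]
    rw [if_neg h1, if_pos h2, if_neg (by rw [hmod]; exact fun hcon => hcon rfl), hdiv,
      if_pos ⟨hk, by ring, by ring⟩]

lemma pvMem_offs {p step : Int × Int} (hstep : step ≠ (0, 0)) (crates : List (Int × Int)) (k : Int) :
    k ∈ crates.filterMap (fun c => pvRayOffset c p step) ↔ 0 ≤ k ∧ pvPos p step k ∈ crates := by
  rw [List.mem_filterMap]
  constructor
  · rintro ⟨c, hc, hray⟩
    obtain ⟨hk, rfl⟩ := pvRayOffset_sound hray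
    exact ⟨hk, hc⟩
  · rintro ⟨hk, hmem⟩
    exact ⟨pvPos p step k, hmem, pvRayOffset_complete hstep hk⟩

-- the mex fold over a nondecreasing list: result r ≥ m0, r absent, every j ∈ [m0, r) present
lemma pvMexFold_spec (l : List Int) (hs : l.Pairwise (· ≤ ·)) (m0 : Int) :
    m0 ≤ l.foldl (fun m k => if k = m then m + 1 else m) m0 ∧
    l.foldl (fun m k => if k = m then m + 1 else m) m0 ∉ l ∧
    ∀ j, m0 ≤ j → j < l.foldl (fun m k => if k = m then m + 1 else m) m0 → j ∈ l := by
  induction l generalizing m0 with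
  | nil =>
    refine ⟨le_rfl, by simp, ?_⟩
    intro j h1 h2
    exact absurd h2 (by simp; omega)
  | cons k t ih =>
    have hkt : ∀ x ∈ t, k ≤ x := (List.pairwise_cons.mp hs).1
    have hst : t.Pairwise (· ≤ ·) := (List.pairwise_cons.mp hs).2
    by_cases hk : k = m0
    · subst hk
      rw [List.foldl_cons, if_pos rfl]
      obtain ⟨h1, h2, h3⟩ := ih hst (k + 1)
      refine ⟨by omega, ?_, ?_⟩
      · simp only [List.mem_cons, not_or]
        exact ⟨by omega, h2⟩
      · intro j hj1 hj2
        rcases eq_or_lt_of_le hj1 with h | h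
        · rw [← h]; exact List.mem_cons_self
        · exact List.mem_cons_of_mem _ (h3 j (by omega) hj2)
    · simp only [List.foldl_cons, if_neg hk]
      obtain ⟨h1, h2, h3⟩ := ih hst m0
      rcases lt_trichotomy k m0 with hlt | heq | hgt
      · refine ⟨h1, ?_, fun j hj1 hj2 => List.mem_cons_of_mem _ (h3 j hj1 hj2)⟩
        simp only [List.mem_cons, not_or]
        exact ⟨by omega, h2⟩
      · exact absurd heq hk
      · -- k > m0: every element of t is ≥ k > m0, so m0 ∉ t and the fold must stay at m0
        have hr : t.foldl (fun m k => if k = m then m + 1 else m) m0 = m0 := by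
          by_contra hne
          have : m0 ∈ t := h3 m0 le_rfl (by omega)
          exact absurd (hkt m0 this) (by omega)
        rw [hr]
        refine ⟨le_rfl, ?_, by omega⟩
        simp only [List.mem_cons, not_or]
        refine ⟨by omega, fun hm => absurd (hkt m0 hm) (by omega)⟩

-- A's scan loop reaches the first non-crate cell at or after `offset`, given enough fuel
lemma pvLoopA_spec (crates walls : List (Int × Int)) (p step : Int × Int) :
    ∀ (fuel : Nat) (offset m : Int), offset ≤ m → pvPos p step m ∉ crates →
      (∀ j, offset ≤ j → j < m → pvPos p step j ∈ crates) → (m - offset).toNat < fuel →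
      pvLoopA crates walls p step offset fuel =
        (pvPos p step m, if pvPos p step m ∈ walls then false else true) := by
  intro fuel
  induction fuel with
  | zero => intro offset m _ _ _ hf; omega
  | succ f ih =>
    intro offset m hle hout hin hf
    rcases eq_or_lt_of_le hle with heq | hlt
    · subst heq
      simp only [pvLoopA, pvPos] at hout ⊢
      rw [if_neg hout]
      split_ifs <;> rfl
    · have hmem : pvPos p step offset ∈ crates := hin offset le_rfl hlt
      simp only [pvLoopA, pvPos] at hmem ⊢
      rw [if_pos hmem]
      have := ih (offset + 1) m (by omega) hout (fun j h1 h2 => hin j (by omega) h2) (by omega)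
      simpa [pvPos] using this

-- the ray cells are pairwise distinct for a nonzero step
lemma pvPos_injective {p step : Int × Int} (hstep : step ≠ (0, 0)) :
    Function.Injective (pvPos p step) := by
  intro a b hab
  simp only [pvPos, Prod.ext_iff] at hab
  by_cases h1 : step.1 = 0
  · have h2 : step.2 ≠ 0 := fun h2 => hstep (Prod.ext h1 h2)
    have hmul : step.2 * a = step.2 * b := by omega
    exact mul_left_cancel₀ h2 hmul
  · have hmul : step.1 * a = step.1 * b := by omega
    exact mul_left_cancel₀ h1 hmul

-- if cells 0..m-1 are all crates, m is at most the number of crates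
lemma pvChain_le_length {p step : Int × Int} (hstep : step ≠ (0, 0)) (crates : List (Int × Int))
    {m : Int} (hm : 0 ≤ m) (hin : ∀ j, 0 ≤ j → j < m → pvPos p step j ∈ crates) :
    m ≤ (crates.length : Int) := by
  have hsub : ((List.range m.toNat).map (fun n : Nat => pvPos p step (n : Int))) ⊆ crates := by
    intro x hx
    rw [List.mem_map] at hx
    obtain ⟨n, hn, rfl⟩ := hx
    rw [List.mem_range] at hn
    exact hin n (Int.natCast_nonneg n) (by omega)
  have hnd : ((List.range m.toNat).map (fun n : Nat => pvPos p step (n : Int))).Nodup := by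
    refine List.Nodup.map ?_ List.nodup_range
    intro a b hab
    exact_mod_cast pvPos_injective hstep hab
  have hlen := (hnd.subperm hsub).length_le
  rw [List.length_map, List.length_range] at hlen
  omega

theorem pv_main (robot_pos : Int × Int) (crates : List (Int × Int)) (walls : List (Int × Int)) (instruction : Int × Int)
    (hpre : Pre_run_instruction robot_pos crates walls instruction) :
    run_instruction robot_pos crates walls instruction = run_instruction_alt robot_pos crates walls instruction := by
  simp only [run_instruction, run_instruction_alt]
  set p : Int × Int := (robot_pos.1 + instruction.1, robot_pos.2 + instruction.2) with hp
  by_cases hw : p ∈ walls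
  · rw [if_pos hw, if_pos hw]
  rw [if_neg hw, if_neg hw]
  by_cases hc : p ∈ crates
  case neg => rw [if_neg hc, if_pos hc]
  rw [if_pos hc, if_neg (not_not_intro hc)]
  -- the degenerate instruction is excluded by Pre_ in this branch
  have hstep : instruction ≠ (0, 0) := by
    rintro rfl
    simp only [add_zero] at hp
    have hpr : p = robot_pos := by rw [hp]
    rcases hpre with h | h | h
    · exact h rfl
    · exact h (hpr ▸ hc)
    · exact hw (by rw [hpr]; exact h)
  -- name B's mex m, then characterise it
  set offs := PySem.List.sorted (crates.filterMap (fun c => pvRayOffset c p instruction)) (fun x => x) false with hoffs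
  set m := offs.foldl (fun m k => if k = m then m + 1 else m) 0 with hm
  have hsorted : offs.Pairwise (· ≤ ·) := PySem.List.sorted_pairwise _ _
  obtain ⟨hm0, hmout, hmin⟩ := pvMexFold_spec offs hsorted 0
  rw [← hm] at hm0 hmout hmin
  have hmem_offs : ∀ k, k ∈ offs ↔ 0 ≤ k ∧ pvPos p instruction k ∈ crates := by
    intro k
    rw [hoffs, PySem.List.mem_sorted, pvMem_offs hstep]
  have hout : pvPos p instruction m ∉ crates := fun h => hmout ((hmem_offs m).mpr ⟨hm0, h⟩)
  have hin : ∀ j, 0 ≤ j → j < m → pvPos p instruction j ∈ crates :=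
    fun j h1 h2 => ((hmem_offs j).mp (hmin j h1 h2)).2
  have hm1 : 1 ≤ m := by
    rcases eq_or_lt_of_le hm0 with h | h
    · exfalso; apply hout; rw [← h]
      simpa [pvPos] using hc
    · omega
  have hlen := pvChain_le_length hstep crates hm0 hin
  have hloop := pvLoopA_spec crates walls p instruction (crates.length + 1) 1 m hm1 hout
    (fun j h1 h2 => hin j (by omega) h2) (by omega)
  rw [hloop]
  by_cases hwm : pvPos p instruction m ∈ walls
  · rw [if_pos hwm]
    have he : (p.1 + instruction.1 * m, p.2 + instruction.2 * m) ∈ walls := hwm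
    rw [if_pos he]
    rfl
  · rw [if_neg hwm]
    have he : (p.1 + instruction.1 * m, p.2 + instruction.2 * m) ∉ walls := hwm
    rw [if_neg he]
    rfl

-- ===== VERDICT (by name: the statement is the Claim_ definition above) =====
theorem run_instruction_spec : Claim_equal_run_instruction := by
  intro robot_pos crates walls instruction _ hpre
  unfold Spec_run_instruction
  exact pv_main robot_pos crates walls instruction hpre
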